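-- pv_equiv track=rewrite | github.com/psh0706/algorithm | Programmers/Python/거리두기 확인하기.py | bfs
-- ===== SOURCE A (Python) =====
-- def bfs(MAP):
--     n, m = len(MAP), len(MAP[0])
--     delta = [[-1, 0], [1, 0], [0, 1], [0, -1]]
--     pList = []
--
--     for i in range(n):
--         for j in range(m):
--             if MAP[i][j] == 'P':
--                 pList.append([i, j])
--
--     for p in pList:
--         q = [[p[0], p[1], 0]]
--         visit = [[False for _ in range(m)] for _ in range(n)]
--         visit[p[0]][p[1]] = True
--
--         while q:
--             node = q.pop(0)
--
--             for d in delta: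
--                 dx = node[0] + d[0]
--                 dy = node[1] + d[1]
--                 if 0 <= dx < n and 0 <= dy < m and not visit[dx][dy]:
--                     if MAP[dx][dy] == 'P':
--                         if node[2]+1 <= 2:
--                             return 0
--                     elif MAP[dx][dy] == 'O':
--                         visit[dx][dy] = True
--                         q.append([dx, dy, node[2] + 1])
--
--     return 1
-- ===== SOURCE B (Python) =====
-- def bfs(MAP):
--     n, m = len(MAP), len(MAP[0])
--     delta = ((-1, 0), (1, 0), (0, 1), (0, -1))
--
--     def danger(i, j):
--         # is there another 'P' adjacent, or at distance 2 through an empty 'O' cell?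
--         for di, dj in delta:
--             x, y = i + di, j + dj
--             if 0 <= x < n and 0 <= y < m:
--                 c = MAP[x][y]
--                 if c == 'P':
--                     return True
--                 if c == 'O' and any(0 <= x + a < n and 0 <= y + b < m
--                                     and (x + a, y + b) != (i, j)
--                                     and MAP[x + a][y + b] == 'P'
--                                     for a, b in delta):
--                     return True
--         return False
--
--     return 0 if any(MAP[i][j] == 'P' and danger(i, j)
--                     for i in range(n) for j in range(m)) else 1
-- ===== Notes on version B (the rewrite author's own statement) =====
-- stated objective: alternative
-- what changed: A runs a full breadth-first search (queue + n×m visited matrix) from every 'P' cell even though a hit can only occur within distance 2; B replaces the BFS entirely by a constant-size local test per 'P' cell (an adjacent 'P', or a 'P' two steps away through an in-range 'O' cell), so the queue and visited matrix disappear.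
import Mathlib
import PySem

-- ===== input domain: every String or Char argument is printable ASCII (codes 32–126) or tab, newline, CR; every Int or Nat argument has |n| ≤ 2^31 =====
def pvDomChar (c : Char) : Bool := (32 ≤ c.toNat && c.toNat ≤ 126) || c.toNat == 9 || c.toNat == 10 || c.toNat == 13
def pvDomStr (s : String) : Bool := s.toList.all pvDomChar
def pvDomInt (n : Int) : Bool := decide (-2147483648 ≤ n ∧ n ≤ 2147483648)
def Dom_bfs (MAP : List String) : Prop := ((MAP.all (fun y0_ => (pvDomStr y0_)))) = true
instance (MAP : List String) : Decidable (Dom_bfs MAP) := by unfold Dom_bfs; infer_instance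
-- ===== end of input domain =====

-- B replaces A's per-'P' breadth-first search (queue + visited matrix) by a constant-size
-- local distance-≤2 test per 'P' cell; the RETURN values are proved equal on Pre_.

-- ===== PORT A =====
-- shared grid indexing: MAP[i][j] (the getD defaults are unreachable at every guarded use site)
def chA (MAP : List String) (i j : Int) : Char :=
  (PySem.Str.pyGet? ((PySem.List.pyGet? MAP i).getD "") j).getD ' '

def deltaA : List (Int × Int) := [(-1, 0), (1, 0), (0, 1), (0, -1)]

-- visit[i][j] read / write (indices guarded 0 ≤ i < n, 0 ≤ j < m at every use site)
def getV (v : List (List Bool)) (i j : Int) : Bool :=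
  (PySem.List.pyGet? ((PySem.List.pyGet? v i).getD []) j).getD false

def setV (v : List (List Bool)) (i j : Int) : List (List Bool) :=
  v.set i.toNat ((v.getD i.toNat []).set j.toNat true)

-- the body of A's `for d in delta:` loop for one popped node (a, b, k):
-- none = `return 0` fired; some (q, visit) = updated queue and visit matrix
def stepA (MAP : List String) (n m a b k : Int) :
    List (Int × Int) → List (Int × Int × Int) → List (List Bool) →
    Option (List (Int × Int × Int) × List (List Bool))
  | [], q, v => some (q, v)
  | d :: ds, q, v =>
    let dx := a + d.1
    let dy := b + d.2
    if 0 ≤ dx ∧ dx < n ∧ 0 ≤ dy ∧ dy < m ∧ getV v dx dy = false then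
      if chA MAP dx dy = 'P' then
        if k + 1 ≤ 2 then none else stepA MAP n m a b k ds q v
      else if chA MAP dx dy = 'O' then
        stepA MAP n m a b k ds (q ++ [(dx, dy, k + 1)]) (setV v dx dy)
      else stepA MAP n m a b k ds q v
    else stepA MAP n m a b k ds q v

-- A's `while q:` loop; true = `return 0`; the fuel only makes the recursion structural
def loopA (MAP : List String) (n m : Int) :
    Nat → List (Int × Int × Int) → List (List Bool) → Bool
  | 0, _, _ => false
  | _ + 1, [], _ => false
  | f + 1, (a, b, k) :: rest, v =>
    match stepA MAP n m a b k deltaA rest v with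
    | none => true
    | some (q', v') => loopA MAP n m f q' v'

def pListA (MAP : List String) (n m : Int) : List (Int × Int) :=
  (PySem.List.pyRange 0 n 1).foldl (fun acc i =>
    (PySem.List.pyRange 0 m 1).foldl (fun acc2 j =>
      if chA MAP i j == 'P' then acc2 ++ [(i, j)] else acc2) acc) []

def initV (n m : Int) (p : Int × Int) : List (List Bool) :=
  setV (List.replicate n.toNat (List.replicate m.toNat false)) p.1 p.2

def outerA (MAP : List String) (n m : Int) : List (Int × Int) → Int
  | [] => 1
  | p :: rest =>
    if loopA MAP n m (n.toNat * m.toNat + 6) [(p.1, p.2, 0)] (initV n m p) then 0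
    else outerA MAP n m rest

def bfs (MAP : List String) : Int :=
  let n : Int := MAP.length
  let m : Int := ((PySem.List.pyGet? MAP 0).getD "").toList.length
  outerA MAP n m (pListA MAP n m)

-- ===== PORT B =====
-- does (x, y) have an in-range 'P' neighbour other than the cell (i, j) itself?
def hasPN (MAP : List String) (n m i j x y : Int) : Bool :=
  deltaA.any fun d =>
    decide (0 ≤ x + d.1) && decide (x + d.1 < n) && decide (0 ≤ y + d.2) && decide (y + d.2 < m)
      && decide ((x + d.1, y + d.2) ≠ (i, j)) && (chA MAP (x + d.1) (y + d.2) == 'P')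

-- another 'P' adjacent to (i, j), or at distance 2 through an empty 'O' cell?
def danger (MAP : List String) (n m i j : Int) : Bool :=
  deltaA.any fun d =>
    decide (0 ≤ i + d.1) && decide (i + d.1 < n) && decide (0 ≤ j + d.2) && decide (j + d.2 < m)
      && ((chA MAP (i + d.1) (j + d.2) == 'P')
          || ((chA MAP (i + d.1) (j + d.2) == 'O')
              && hasPN MAP n m i j (i + d.1) (j + d.2)))

def bfs_alt (MAP : List String) : Int :=
  let n : Int := MAP.length
  let m : Int := ((PySem.List.pyGet? MAP 0).getD "").toList.length
  if (PySem.List.pyRange 0 n 1).any (fun i =>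
       (PySem.List.pyRange 0 m 1).any fun j =>
         (chA MAP i j == 'P') && danger MAP n m i j) then 0 else 1

-- ===== PRECONDITION & SPEC =====
-- Pre_ excludes exactly the inputs where Python A raises an IndexError: empty MAP
-- (len(MAP[0])) and rows shorter than row 0 (MAP[i][j] in the first loop).
def Pre_bfs (MAP : List String) : Prop :=
  MAP ≠ [] ∧ ∀ s ∈ MAP, (MAP.headD "").toList.length ≤ s.toList.length
instance (MAP : List String) : Decidable (Pre_bfs MAP) := by unfold Pre_bfs; infer_instance

def pvWitness_bfs : List String := ["POO", "OOO", "OOP"]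

def Spec_bfs (MAP : List String) (out : Int) : Prop := out = bfs_alt MAP
instance (MAP : List String) (out : Int) : Decidable (Spec_bfs MAP out) := by unfold Spec_bfs; infer_instance

-- ===== CLAIM (what is proved, stated in full; the proofs are below) =====
def Claim_equal_bfs : Prop := ∀ (MAP : List String), Dom_bfs MAP → Pre_bfs MAP → Spec_bfs MAP (bfs MAP)

-- ===== LEMMAS AND PROOFS =====

-- proof-only vocabulary ------------------------------------------------------
def inR (n m x y : Int) : Prop := 0 ≤ x ∧ x < n ∧ 0 ≤ y ∧ y < m

-- (x, y) has an in-range 'P' neighbour other than p (the semantic reading of hasPN)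
def Qual (MAP : List String) (n m : Int) (p : Int × Int) (x y : Int) : Prop :=
  ∃ d ∈ deltaA, inR n m (x + d.1) (y + d.2) ∧ (x + d.1, y + d.2) ≠ p ∧
    chA MAP (x + d.1) (y + d.2) = 'P'

-- the visit matrix always marks p, and marks p and O-cells only
def VisInv (MAP : List String) (p : Int × Int) (v : List (List Bool)) : Prop :=
  getV v p.1 p.2 = true ∧
  ∀ x y : Int, 0 ≤ x → 0 ≤ y → getV v x y = true → chA MAP x y = 'O' ∨ (x, y) = p

def Shape (n m : Int) (v : List (List Bool)) : Prop :=
  v.length = n.toNat ∧ ∀ r ∈ v, r.length = m.toNat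

-- a queue node that can never make A return 0
def Dead (MAP : List String) (n m : Int) (p : Int × Int) (nd : Int × Int × Int) : Prop :=
  2 ≤ nd.2.2 ∨ (nd.2.2 = 1 ∧ ¬ Qual MAP n m p nd.1 nd.2.1)

lemma getV_nonneg (v : List (List Bool)) (x y : Int) (hx : 0 ≤ x) (hy : 0 ≤ y) :
    getV v x y = ((v[x.toNat]?.getD [])[y.toNat]?).getD false := by
  simp [getV, PySem.List.pyGet?_of_nonneg, hx, hy]

lemma getV_setV_ne (v : List (List Bool)) (a b x y : Int)
    (hne : (x, y) ≠ (a, b)) (hx : 0 ≤ x) (hy : 0 ≤ y) (ha : 0 ≤ a) (hb : 0 ≤ b) :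
    getV (setV v a b) x y = getV v x y := by
  rw [getV_nonneg _ _ _ hx hy, getV_nonneg _ _ _ hx hy]
  unfold setV
  by_cases hl : a.toNat < v.length
  · by_cases hxa : x = a
    · subst hxa
      have hyb : y.toNat ≠ b.toNat := by
        intro h; exact hne (by rw [show y = b by omega])
      rw [List.getElem?_set_self hl]
      simp only [Option.getD_some]
      rw [List.getElem?_set_ne (by omega : b.toNat ≠ y.toNat)]
      rw [List.getD_eq_getElem?_getD]
    · rw [List.getElem?_set_ne (by omega : a.toNat ≠ x.toNat)]
  · rw [List.set_eq_of_length_le (by omega)]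

lemma getV_setV_mono (v : List (List Bool)) (a b x y : Int)
    (hx : 0 ≤ x) (hy : 0 ≤ y)
    (h : getV v x y = true) : getV (setV v a b) x y = true := by
  rw [getV_nonneg _ _ _ hx hy] at h ⊢
  unfold setV
  by_cases hl : a.toNat < v.length
  · by_cases hxa : x.toNat = a.toNat
    · rw [hxa] at h ⊢
      rw [List.getElem?_set_self hl]
      simp only [Option.getD_some]
      have hrow : v[a.toNat]?.getD [] = v.getD a.toNat [] := by
        rw [List.getD_eq_getElem?_getD]
      rw [hrow] at h
      by_cases hyb : y.toNat = b.toNat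
      · rw [hyb] at h ⊢
        by_cases hbl : b.toNat < (v.getD a.toNat []).length
        · rw [List.getElem?_set_self hbl]; rfl
        · rw [List.set_eq_of_length_le (by omega)]; exact h
      · rw [List.getElem?_set_ne (by omega : b.toNat ≠ y.toNat)]; exact h
    · rw [List.getElem?_set_ne (by omega : a.toNat ≠ x.toNat)]; exact h
  · rw [List.set_eq_of_length_le (by omega)]; exact h

lemma getV_setV_cases (v : List (List Bool)) (a b x y : Int)
    (hx : 0 ≤ x) (hy : 0 ≤ y) (ha : 0 ≤ a) (hb : 0 ≤ b)
    (h : getV (setV v a b) x y = true) : getV v x y = true ∨ (x, y) = (a, b) := by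
  by_cases hne : (x, y) = (a, b)
  · exact Or.inr hne
  · left; rw [← getV_setV_ne v a b x y hne hx hy ha hb]; exact h

lemma getV_setV_self (v : List (List Bool)) (a b : Int) (ha : 0 ≤ a) (hb : 0 ≤ b)
    (h1 : a.toNat < v.length) (h2 : b.toNat < (v.getD a.toNat []).length) :
    getV (setV v a b) a b = true := by
  rw [getV_nonneg _ _ _ ha hb]
  unfold setV
  rw [List.getElem?_set_self h1]
  simp only [Option.getD_some]
  rw [List.getElem?_set_self h2]
  rfl

lemma shape_setV (n m : Int) (v : List (List Bool)) (hs : Shape n m v) (a b : Int) :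
    Shape n m (setV v a b) := by
  by_cases hl : a.toNat < v.length
  · refine ⟨by simp [setV, hs.1], ?_⟩
    intro r hr
    rcases List.mem_or_eq_of_mem_set hr with h | h
    · exact hs.2 r h
    · subst h
      rw [List.length_set]
      apply hs.2
      rw [List.getD_eq_getElem _ _ hl]
      exact List.getElem_mem hl
  · unfold setV
    rw [List.set_eq_of_length_le (by omega)]
    exact hs

lemma getV_repl (n m : Int) (x y : Int) :
    getV (List.replicate n.toNat (List.replicate m.toNat false)) x y = false := by
  unfold getV
  cases hrow : PySem.List.pyGet? (List.replicate n.toNat (List.replicate m.toNat false)) x with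
  | none => simp [PySem.List.pyGet?]
  | some r =>
    have hr : r ∈ List.replicate n.toNat (List.replicate m.toNat false) :=
      PySem.List.mem_of_pyGet?_eq_some _ hrow
    have : r = List.replicate m.toNat false := List.eq_of_mem_replicate hr
    subst this
    simp only [Option.getD_some]
    cases he : PySem.List.pyGet? (List.replicate m.toNat false) y with
    | none => rfl
    | some e =>
      have : e ∈ List.replicate m.toNat false := PySem.List.mem_of_pyGet?_eq_some _ he
      simp [List.eq_of_mem_replicate this]

lemma delta_ne (x y : Int) : ∀ d ∈ deltaA, (x + d.1, y + d.2) ≠ (x, y) := by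
  intro d hd
  fin_cases hd <;> simp

lemma exists_first_split {α : Type} (P : α → Prop) :
    ∀ l : List α, (∃ x ∈ l, P x) →
      ∃ l1 x l2, l = l1 ++ x :: l2 ∧ P x ∧ ∀ y ∈ l1, ¬ P y := by
  intro l
  induction l with
  | nil => rintro ⟨x, hx, -⟩; cases hx
  | cons a l ih =>
    intro h
    by_cases ha : P a
    · exact ⟨[], a, l, rfl, ha, by simp⟩
    · obtain ⟨x, hx, hPx⟩ := h
      rcases List.mem_cons.mp hx with rfl | hx
      · exact absurd hPx ha
      · obtain ⟨l1, x', l2, heq, hP', hnone⟩ := ih ⟨x, hx, hPx⟩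
        refine ⟨a :: l1, x', l2, by rw [heq]; rfl, hP', ?_⟩
        intro y hy
        rcases List.mem_cons.mp hy with rfl | hy
        · exact ha
        · exact hnone y hy

-- characterisation of `return 0` inside one delta-scan
lemma stepA_none_iff (MAP : List String) (n m a b k : Int) :
    ∀ (ds : List (Int × Int)) (q : List (Int × Int × Int)) (v : List (List Bool)),
      (stepA MAP n m a b k ds q v = none ↔
        (k + 1 ≤ 2 ∧ ∃ d ∈ ds, inR n m (a + d.1) (b + d.2) ∧
          getV v (a + d.1) (b + d.2) = false ∧ chA MAP (a + d.1) (b + d.2) = 'P')) := by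
  intro ds
  induction ds with
  | nil => intro q v; simp [stepA]
  | cons d ds ih =>
    intro q v
    rw [show stepA MAP n m a b k (d :: ds) q v =
      (if 0 ≤ a + d.1 ∧ a + d.1 < n ∧ 0 ≤ b + d.2 ∧ b + d.2 < m ∧
          getV v (a + d.1) (b + d.2) = false then
        if chA MAP (a + d.1) (b + d.2) = 'P' then
          if k + 1 ≤ 2 then none else stepA MAP n m a b k ds q v
        else if chA MAP (a + d.1) (b + d.2) = 'O' then
          stepA MAP n m a b k ds (q ++ [(a + d.1, b + d.2, k + 1)]) (setV v (a + d.1) (b + d.2))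
        else stepA MAP n m a b k ds q v
      else stepA MAP n m a b k ds q v) from rfl]
    by_cases hg : 0 ≤ a + d.1 ∧ a + d.1 < n ∧ 0 ≤ b + d.2 ∧ b + d.2 < m ∧
        getV v (a + d.1) (b + d.2) = false
    · rw [if_pos hg]
      by_cases hP : chA MAP (a + d.1) (b + d.2) = 'P'
      · rw [if_pos hP]
        by_cases hk : k + 1 ≤ 2
        · rw [if_pos hk]
          simp only [true_iff]
          exact ⟨hk, d, List.mem_cons_self,
            ⟨hg.1, hg.2.1, hg.2.2.1, hg.2.2.2.1⟩, hg.2.2.2.2, hP⟩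
        · rw [if_neg hk, ih]
          constructor
          · rintro ⟨h2, -⟩; exact absurd h2 hk
          · rintro ⟨h2, -⟩; exact absurd h2 hk
      · rw [if_neg hP]
        by_cases hO : chA MAP (a + d.1) (b + d.2) = 'O'
        · rw [if_pos hO, ih]
          constructor
          · rintro ⟨hk2, d', hd', hir, hgv, hP'⟩
            refine ⟨hk2, d', List.mem_cons_of_mem _ hd', hir, ?_, hP'⟩
            by_contra hvv
            have hvv' : getV v (a + d'.1) (b + d'.2) = true := by
              cases hgv2 : getV v (a + d'.1) (b + d'.2) with
              | true => rfl
              | false => exact absurd hgv2 hvv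
            have := getV_setV_mono v (a + d.1) (b + d.2) (a + d'.1) (b + d'.2)
              hir.1 hir.2.2.1 hvv'
            rw [this] at hgv; cases hgv
          · rintro ⟨hk2, d', hd', hir, hgv, hP'⟩
            rcases List.mem_cons.mp hd' with rfl | hd'
            · exact absurd hP' hP
            · refine ⟨hk2, d', hd', hir, ?_, hP'⟩
              rw [getV_setV_ne v _ _ _ _ ?_ hir.1 hir.2.2.1 hg.1 hg.2.2.1]
              · exact hgv
              · intro hcontra
                rw [show a + d'.1 = a + d.1 from congrArg Prod.fst hcontra,
                    show b + d'.2 = b + d.2 from congrArg Prod.snd hcontra] at hP'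
                exact hP hP'
        · rw [if_neg hO, ih]
          constructor
          · rintro ⟨hk2, d', hd', rest⟩
            exact ⟨hk2, d', List.mem_cons_of_mem _ hd', rest⟩
          · rintro ⟨hk2, d', hd', hir, hgv, hP'⟩
            rcases List.mem_cons.mp hd' with rfl | hd'
            · exact absurd hP' hP
            · exact ⟨hk2, d', hd', hir, hgv, hP'⟩
    · rw [if_neg hg, ih]
      constructor
      · rintro ⟨hk2, d', hd', rest⟩
        exact ⟨hk2, d', List.mem_cons_of_mem _ hd', rest⟩
      · rintro ⟨hk2, d', hd', hir, hgv, hP'⟩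
        rcases List.mem_cons.mp hd' with rfl | hd'
        · exact absurd ⟨hir.1, hir.2.1, hir.2.2.1, hir.2.2.2, hgv⟩ hg
        · exact ⟨hk2, d', hd', hir, hgv, hP'⟩

-- full description of a delta-scan that did not return
lemma stepA_some_spec (MAP : List String) (n m a b k : Int) :
    ∀ (ds : List (Int × Int)) (q q' : List (Int × Int × Int)) (v v' : List (List Bool)),
      stepA MAP n m a b k ds q v = some (q', v') →
      ∃ news, q' = q ++ news ∧ news.length ≤ ds.length ∧
        (∀ nd ∈ news, nd.2.2 = k + 1 ∧ (∃ d ∈ ds, nd.1 = a + d.1 ∧ nd.2.1 = b + d.2) ∧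
          inR n m nd.1 nd.2.1 ∧ chA MAP nd.1 nd.2.1 = 'O') ∧
        (∀ x y : Int, 0 ≤ x → 0 ≤ y → getV v' x y = true →
          getV v x y = true ∨ chA MAP x y = 'O') ∧
        (∀ x y : Int, 0 ≤ x → 0 ≤ y → getV v x y = true → getV v' x y = true) ∧
        (Shape n m v → Shape n m v') ∧
        (∀ d ∈ ds, inR n m (a + d.1) (b + d.2) → chA MAP (a + d.1) (b + d.2) = 'O' →
          getV v (a + d.1) (b + d.2) = false →
          (a + d.1, b + d.2) ∈ news.map (fun nd => (nd.1, nd.2.1))) := by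
  intro ds
  induction ds with
  | nil =>
    intro q q' v v' h
    simp only [stepA, Option.some_inj, Prod.mk.injEq] at h
    obtain ⟨rfl, rfl⟩ := h
    exact ⟨[], by simp, by simp, by simp, fun x y _ _ hxy => Or.inl hxy,
      fun x y _ _ hxy => hxy, id, by simp⟩
  | cons d ds ih =>
    intro q q' v v' h
    rw [show stepA MAP n m a b k (d :: ds) q v =
      (if 0 ≤ a + d.1 ∧ a + d.1 < n ∧ 0 ≤ b + d.2 ∧ b + d.2 < m ∧
          getV v (a + d.1) (b + d.2) = false then
        if chA MAP (a + d.1) (b + d.2) = 'P' then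
          if k + 1 ≤ 2 then none else stepA MAP n m a b k ds q v
        else if chA MAP (a + d.1) (b + d.2) = 'O' then
          stepA MAP n m a b k ds (q ++ [(a + d.1, b + d.2, k + 1)]) (setV v (a + d.1) (b + d.2))
        else stepA MAP n m a b k ds q v
      else stepA MAP n m a b k ds q v) from rfl] at h
    by_cases hg : 0 ≤ a + d.1 ∧ a + d.1 < n ∧ 0 ≤ b + d.2 ∧ b + d.2 < m ∧
        getV v (a + d.1) (b + d.2) = false
    · rw [if_pos hg] at h
      by_cases hP : chA MAP (a + d.1) (b + d.2) = 'P'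
      · rw [if_pos hP] at h
        by_cases hk : k + 1 ≤ 2
        · rw [if_pos hk] at h; cases h
        · rw [if_neg hk] at h
          obtain ⟨news, h1, h2, h3, h4, h5, h6, h7⟩ := ih q q' v v' h
          refine ⟨news, h1, by simp only [List.length_cons]; omega, ?_, h4, h5, h6, ?_⟩
          · intro nd hnd
            obtain ⟨ha1, ⟨d', hd', he⟩, ha3, ha4⟩ := h3 nd hnd
            exact ⟨ha1, ⟨d', List.mem_cons_of_mem _ hd', he⟩, ha3, ha4⟩
          · intro d' hd' hir hO hgv
            rcases List.mem_cons.mp hd' with rfl | hd'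
            · exact absurd hO (by rw [hP]; decide)
            · exact h7 d' hd' hir hO hgv
      · rw [if_neg hP] at h
        by_cases hO : chA MAP (a + d.1) (b + d.2) = 'O'
        · rw [if_pos hO] at h
          obtain ⟨news, h1, h2, h3, h4, h5, h6, h7⟩ :=
            ih (q ++ [(a + d.1, b + d.2, k + 1)]) q' (setV v (a + d.1) (b + d.2)) v' h
          refine ⟨(a + d.1, b + d.2, k + 1) :: news,
            by rw [h1]; simp, by simp only [List.length_cons]; omega, ?_, ?_, ?_, ?_, ?_⟩
          · intro nd hnd
            rcases List.mem_cons.mp hnd with rfl | hnd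
            · exact ⟨rfl, ⟨d, List.mem_cons_self, rfl, rfl⟩,
                ⟨hg.1, hg.2.1, hg.2.2.1, hg.2.2.2.1⟩, hO⟩
            · obtain ⟨ha1, ⟨d', hd', he⟩, ha3, ha4⟩ := h3 nd hnd
              exact ⟨ha1, ⟨d', List.mem_cons_of_mem _ hd', he⟩, ha3, ha4⟩
          · intro x y hx hy hxy
            rcases h4 x y hx hy hxy with h' | h'
            · rcases getV_setV_cases v _ _ x y hx hy hg.1 hg.2.2.1 h' with h'' | h''
              · exact Or.inl h''
              · right
                rw [show x = a + d.1 from congrArg Prod.fst h'',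
                    show y = b + d.2 from congrArg Prod.snd h'']
                exact hO
            · exact Or.inr h'
          · intro x y hx hy hxy
            exact h5 x y hx hy (getV_setV_mono v _ _ x y hx hy hxy)
          · intro hs; exact h6 (shape_setV n m v hs _ _)
          · intro d' hd' hir hO' hgv
            rcases List.mem_cons.mp hd' with rfl | hd'
            · simp
            · by_cases hsame : (a + d'.1, b + d'.2) = (a + d.1, b + d.2)
              · simp [hsame]
              · have : getV (setV v (a + d.1) (b + d.2)) (a + d'.1) (b + d'.2) = false := by
                  rw [getV_setV_ne v _ _ _ _ hsame hir.1 hir.2.2.1 hg.1 hg.2.2.1]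
                  exact hgv
                have := h7 d' hd' hir hO' this
                simp only [List.map_cons, List.mem_cons]
                exact Or.inr this
        · rw [if_neg hO] at h
          obtain ⟨news, h1, h2, h3, h4, h5, h6, h7⟩ := ih q q' v v' h
          refine ⟨news, h1, by simp only [List.length_cons]; omega, ?_, h4, h5, h6, ?_⟩
          · intro nd hnd
            obtain ⟨ha1, ⟨d', hd', he⟩, ha3, ha4⟩ := h3 nd hnd
            exact ⟨ha1, ⟨d', List.mem_cons_of_mem _ hd', he⟩, ha3, ha4⟩
          · intro d' hd' hir hO' hgv
            rcases List.mem_cons.mp hd' with rfl | hd'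
            · exact absurd hO' hO
            · exact h7 d' hd' hir hO' hgv
    · rw [if_neg hg] at h
      obtain ⟨news, h1, h2, h3, h4, h5, h6, h7⟩ := ih q q' v v' h
      refine ⟨news, h1, by simp only [List.length_cons]; omega, ?_, h4, h5, h6, ?_⟩
      · intro nd hnd
        obtain ⟨ha1, ⟨d', hd', he⟩, ha3, ha4⟩ := h3 nd hnd
        exact ⟨ha1, ⟨d', List.mem_cons_of_mem _ hd', he⟩, ha3, ha4⟩
      · intro d' hd' hir hO' hgv
        rcases List.mem_cons.mp hd' with rfl | hd'
        · exact absurd ⟨hir.1, hir.2.1, hir.2.2.1, hir.2.2.2, hgv⟩ hg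
        · exact h7 d' hd' hir hO' hgv

-- popping a dead node cannot fire `return 0`
lemma stepA_not_none_of_dead (MAP : List String) (n m : Int) (p : Int × Int)
    (a b k : Int) (rest : List (Int × Int × Int)) (v : List (List Bool))
    (hinv : VisInv MAP p v) (hdead : Dead MAP n m p (a, b, k)) :
    stepA MAP n m a b k deltaA rest v ≠ none := by
  intro hst
  obtain ⟨hk2, d, hd, hir, hgv, hP⟩ := (stepA_none_iff MAP n m a b k deltaA rest v).mp hst
  rcases hdead with h2 | ⟨h1, hnq⟩
  · simp only at h2; omega
  · by_cases hp : (a + d.1, b + d.2) = p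
    · have h1' : a + d.1 = p.1 := congrArg Prod.fst hp
      have h2' : b + d.2 = p.2 := congrArg Prod.snd hp
      rw [h1', h2', hinv.1] at hgv; cases hgv
    · exact hnq ⟨d, hd, hir, hp, hP⟩

-- a queue of dead nodes never returns 0
lemma loopA_dead (MAP : List String) (n m : Int) (p : Int × Int)
    (hp1 : 0 ≤ p.1) (hp2 : 0 ≤ p.2) :
    ∀ (fuel : Nat) (q : List (Int × Int × Int)) (v : List (List Bool)),
      Shape n m v → VisInv MAP p v → (∀ nd ∈ q, Dead MAP n m p nd) →
      loopA MAP n m fuel q v = false := by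
  intro fuel
  induction fuel with
  | zero => intro q v _ _ _; rfl
  | succ f ih =>
    intro q v hs hinv hq
    cases q with
    | nil => rfl
    | cons nd rest =>
      obtain ⟨a, b, k⟩ := nd
      simp only [loopA]
      cases hst : stepA MAP n m a b k deltaA rest v with
      | none =>
        exact absurd hst
          (stepA_not_none_of_dead MAP n m p a b k rest v hinv (hq _ List.mem_cons_self))
      | some res =>
        obtain ⟨q', v'⟩ := res
        obtain ⟨news, h1, h2, h3, h4, h5, h6, h7⟩ :=
          stepA_some_spec MAP n m a b k deltaA rest q' v v' hst
        apply ih q' v' (h6 hs)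
        · exact ⟨h5 p.1 p.2 hp1 hp2 hinv.1,
            fun x y hx hy hxy => (h4 x y hx hy hxy).elim (hinv.2 x y hx hy) Or.inl⟩
        · intro nd hnd
          rw [h1] at hnd
          rcases List.mem_append.mp hnd with hnd | hnd
          · exact hq _ (List.mem_cons_of_mem _ hnd)
          · obtain ⟨hdep, -, -, -⟩ := h3 nd hnd
            have hdk := hq (a, b, k) List.mem_cons_self
            left
            rcases hdk with h' | ⟨h', -⟩
            · simp only at h' ⊢; omega
            · simp only at h' ⊢; omega

-- a qualifying depth-1 node behind dead nodes returns 0 (given enough fuel)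
lemma loopA_pos (MAP : List String) (n m : Int) (p : Int × Int)
    (hp1 : 0 ≤ p.1) (hp2 : 0 ≤ p.2) :
    ∀ (q1 : List (Int × Int × Int)) (fuel : Nat) (v : List (List Bool))
      (q2 : List (Int × Int × Int)) (x y : Int),
      Shape n m v → VisInv MAP p v → (∀ nd ∈ q1, Dead MAP n m p nd) →
      Qual MAP n m p x y → q1.length + 1 ≤ fuel →
      loopA MAP n m fuel (q1 ++ (x, y, 1) :: q2) v = true := by
  intro q1
  induction q1 with
  | nil =>
    intro fuel v q2 x y hs hinv _ hqual hfuel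
    obtain ⟨f, rfl⟩ : ∃ f, fuel = f + 1 := ⟨fuel - 1, by omega⟩
    simp only [List.nil_append, loopA]
    obtain ⟨d, hd, hir, hne, hP⟩ := hqual
    have hgv : getV v (x + d.1) (y + d.2) = false := by
      cases hgv2 : getV v (x + d.1) (y + d.2) with
      | false => rfl
      | true =>
        rcases hinv.2 _ _ hir.1 hir.2.2.1 hgv2 with h' | h'
        · rw [hP] at h'; cases h'
        · exact absurd h' hne
    rw [(stepA_none_iff MAP n m x y 1 deltaA q2 v).mpr
      ⟨by omega, d, hd, hir, hgv, hP⟩]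
  | cons nd q1 ih =>
    intro fuel v q2 x y hs hinv hq1 hqual hfuel
    obtain ⟨f, rfl⟩ : ∃ f, fuel = f + 1 := ⟨fuel - 1, by omega⟩
    obtain ⟨a, b, k⟩ := nd
    simp only [List.cons_append, loopA]
    cases hst : stepA MAP n m a b k deltaA (q1 ++ (x, y, 1) :: q2) v with
    | none =>
      exact absurd hst
        (stepA_not_none_of_dead MAP n m p a b k _ v hinv (hq1 _ List.mem_cons_self))
    | some res =>
      obtain ⟨q', v'⟩ := res
      obtain ⟨news, h1, h2, h3, h4, h5, h6, h7⟩ :=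
        stepA_some_spec MAP n m a b k deltaA _ q' v v' hst
      have hq' : q' = q1 ++ (x, y, 1) :: (q2 ++ news) := by
        rw [h1]; simp
      rw [hq']
      apply ih f v' (q2 ++ news) x y (h6 hs)
      · exact ⟨h5 p.1 p.2 hp1 hp2 hinv.1,
          fun x' y' hx hy hxy => (h4 x' y' hx hy hxy).elim (hinv.2 x' y' hx hy) Or.inl⟩
      · intro nd hnd; exact hq1 _ (List.mem_cons_of_mem _ hnd)
      · exact hqual
      · simp only [List.length_cons] at hfuel; omega

lemma shape_initV (n m : Int) (p : Int × Int) : Shape n m (initV n m p) := by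
  apply shape_setV
  exact ⟨by simp, fun r hr => by rw [List.eq_of_mem_replicate hr]; simp⟩

lemma getV_initV (n m : Int) (p : Int × Int) (hpr : inR n m p.1 p.2) :
    ∀ x y : Int, 0 ≤ x → 0 ≤ y →
      (getV (initV n m p) x y = true ↔ (x, y) = p) := by
  intro x y hx hy
  constructor
  · intro h
    rcases getV_setV_cases _ _ _ x y hx hy hpr.1 hpr.2.2.1 h with h' | h'
    · rw [getV_repl] at h'; cases h'
    · rw [h']
  · rintro rfl
    obtain ⟨a1, a2, a3, a4⟩ := hpr
    have a1' : 0 ≤ x := a1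
    have a2' : x < n := a2
    have a3' : 0 ≤ y := a3
    have a4' : y < m := a4
    have h1 : x.toNat < (List.replicate n.toNat (List.replicate m.toNat false)).length := by
      simp only [List.length_replicate]; omega
    have h2 : y.toNat <
        ((List.replicate n.toNat (List.replicate m.toNat false)).getD x.toNat []).length := by
      rw [List.getD_eq_getElem _ _ h1]
      simp only [List.getElem_replicate, List.length_replicate]; omega
    exact getV_setV_self _ _ _ a1' a3' h1 h2

-- the BFS from p returns 0 exactly when B's local test fires
lemma loopA_start (MAP : List String) (n m : Int) (p : Int × Int) (fuel : Nat)
    (hf : 6 ≤ fuel) (hpr : inR n m p.1 p.2) :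
    (loopA MAP n m fuel [(p.1, p.2, 0)] (initV n m p) = true ↔
      (∃ d ∈ deltaA, inR n m (p.1 + d.1) (p.2 + d.2) ∧
        (chA MAP (p.1 + d.1) (p.2 + d.2) = 'P' ∨
         (chA MAP (p.1 + d.1) (p.2 + d.2) = 'O' ∧
          Qual MAP n m p (p.1 + d.1) (p.2 + d.2))))) := by
  obtain ⟨f, rfl⟩ : ∃ f, fuel = f + 1 := ⟨fuel - 1, by omega⟩
  have hf5 : 5 ≤ f := by omega
  have hv0 := getV_initV n m p hpr
  have hs0 := shape_initV n m p
  have hgv0 : ∀ d ∈ deltaA, inR n m (p.1 + d.1) (p.2 + d.2) →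
      getV (initV n m p) (p.1 + d.1) (p.2 + d.2) = false := by
    intro d hd hir
    cases hgv2 : getV (initV n m p) (p.1 + d.1) (p.2 + d.2) with
    | false => rfl
    | true =>
      have := (hv0 _ _ hir.1 hir.2.2.1).mp hgv2
      exact absurd this (by simpa using delta_ne p.1 p.2 d hd)
  simp only [loopA]
  by_cases H1 : ∃ d ∈ deltaA, inR n m (p.1 + d.1) (p.2 + d.2) ∧
      chA MAP (p.1 + d.1) (p.2 + d.2) = 'P'
  · obtain ⟨d, hd, hir, hP⟩ := H1
    rw [(stepA_none_iff MAP n m p.1 p.2 0 deltaA [] (initV n m p)).mpr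
      ⟨by omega, d, hd, hir, hgv0 d hd hir, hP⟩]
    exact iff_of_true rfl ⟨d, hd, hir, Or.inl hP⟩
  · cases hst : stepA MAP n m p.1 p.2 0 deltaA [] (initV n m p) with
    | none =>
      obtain ⟨-, d, hd, hir, -, hP⟩ :=
        (stepA_none_iff MAP n m p.1 p.2 0 deltaA [] (initV n m p)).mp hst
      exact absurd ⟨d, hd, hir, hP⟩ H1
    | some res =>
      obtain ⟨q', v'⟩ := res
      obtain ⟨news, h1, h2, h3, h4, h5, h6, h7⟩ :=
        stepA_some_spec MAP n m p.1 p.2 0 deltaA [] q' (initV n m p) v' hst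
      simp only [List.nil_append] at h1
      subst h1
      have hinv' : VisInv MAP p v' :=
        ⟨h5 p.1 p.2 hpr.1 hpr.2.2.1 ((hv0 p.1 p.2 hpr.1 hpr.2.2.1).mpr rfl),
         fun x y hx hy hxy => (h4 x y hx hy hxy).elim
           (fun h0 => Or.inr ((hv0 x y hx hy).mp h0)) Or.inl⟩
      show loopA MAP n m f q' v' = true ↔ _
      by_cases H2 : ∃ d ∈ deltaA, inR n m (p.1 + d.1) (p.2 + d.2) ∧
          chA MAP (p.1 + d.1) (p.2 + d.2) = 'O' ∧ Qual MAP n m p (p.1 + d.1) (p.2 + d.2)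
      · obtain ⟨d, hd, hir, hO, hqual⟩ := H2
        have hmem := h7 d hd hir hO (hgv0 d hd hir)
        obtain ⟨nd, hndmem, hndpos⟩ := List.mem_map.mp hmem
        have hqual_nd : Qual MAP n m p nd.1 nd.2.1 := by
          rw [show nd.1 = p.1 + d.1 from congrArg Prod.fst hndpos,
              show nd.2.1 = p.2 + d.2 from congrArg Prod.snd hndpos]
          exact hqual
        obtain ⟨l1, nd', l2, hsplit, hq', hnone⟩ :=
          exists_first_split (fun nd : Int × Int × Int => Qual MAP n m p nd.1 nd.2.1)
            q' ⟨nd, hndmem, hqual_nd⟩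
        have hnd' : nd' = (nd'.1, nd'.2.1, (1 : Int)) := by
          have hh := (h3 nd' (by rw [hsplit]; exact List.mem_append_right _ List.mem_cons_self)).1
          rw [show (0 : Int) + 1 = 1 by ring] at hh
          rw [← hh]
        have hl1dead : ∀ x ∈ l1, Dead MAP n m p x := by
          intro x hx
          obtain ⟨hdep, -, -, -⟩ := h3 x (by rw [hsplit]; exact List.mem_append_left _ hx)
          right
          rw [show (0 : Int) + 1 = 1 by ring] at hdep
          exact ⟨hdep, hnone x hx⟩
        have hflen : l1.length + 1 ≤ f := by
          have hlen : l1.length < q'.length := by rw [hsplit]; simp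
          have h4' : q'.length ≤ 4 := by simpa [deltaA] using h2
          omega
        have hnews : loopA MAP n m f q' v' = true := by
          rw [hsplit, show nd' = (nd'.1, nd'.2.1, (1 : Int)) from hnd']
          exact loopA_pos MAP n m p hpr.1 hpr.2.2.1 l1 f v' l2 nd'.1 nd'.2.1
            (h6 hs0) hinv' hl1dead hq' hflen
        exact iff_of_true hnews ⟨d, hd, hir, Or.inr ⟨hO, hqual⟩⟩
      · have hdead : ∀ nd ∈ q', Dead MAP n m p nd := by
          intro nd hnd
          obtain ⟨hdep, ⟨d', hd', he1, he2⟩, hir', hO'⟩ := h3 nd hnd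
          right
          rw [show (0 : Int) + 1 = 1 by ring] at hdep
          refine ⟨hdep, ?_⟩
          intro hq
          exact H2 ⟨d', hd', by rw [← he1, ← he2]; exact hir',
            by rw [← he1, ← he2]; exact hO', by rw [← he1, ← he2]; exact hq⟩
        have hfalse := loopA_dead MAP n m p hpr.1 hpr.2.2.1 f q' v' (h6 hs0) hinv' hdead
        refine iff_of_false (by rw [hfalse]; simp) ?_
        rintro ⟨d, hd, hir, hP | ⟨hO, hq⟩⟩
        · exact H1 ⟨d, hd, hir, hP⟩
        · exact H2 ⟨d, hd, hir, hO, hq⟩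

lemma danger_iff (MAP : List String) (n m i j : Int) :
    (danger MAP n m i j = true ↔
      (∃ d ∈ deltaA, inR n m (i + d.1) (j + d.2) ∧
        (chA MAP (i + d.1) (j + d.2) = 'P' ∨
         (chA MAP (i + d.1) (j + d.2) = 'O' ∧
          Qual MAP n m (i, j) (i + d.1) (j + d.2))))) := by
  simp only [danger, hasPN, Qual, inR, List.any_eq_true, Bool.and_eq_true, Bool.or_eq_true,
    decide_eq_true_eq, beq_iff_eq, ne_eq]
  constructor
  · rintro ⟨d, hd, ⟨⟨⟨h1, h2⟩, h3⟩, h4⟩, h5⟩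
    refine ⟨d, hd, ⟨h1, h2, h3, h4⟩, ?_⟩
    rcases h5 with h5 | ⟨h5, d', hd', h6⟩
    · exact Or.inl h5
    · refine Or.inr ⟨h5, d', hd', ?_⟩
      obtain ⟨⟨⟨⟨⟨g1, g2⟩, g3⟩, g4⟩, g5⟩, g6⟩ := h6
      exact ⟨⟨g1, g2, g3, g4⟩, g5, g6⟩
  · rintro ⟨d, hd, ⟨h1, h2, h3, h4⟩, h5⟩
    refine ⟨d, hd, ⟨⟨⟨h1, h2⟩, h3⟩, h4⟩, ?_⟩
    rcases h5 with h5 | ⟨h5, d', hd', ⟨g1, g2, g3, g4⟩, g5, g6⟩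
    · exact Or.inl h5
    · exact Or.inr ⟨h5, d', hd', ⟨⟨⟨⟨g1, g2⟩, g3⟩, g4⟩, g5⟩, g6⟩

lemma outerA_eq (MAP : List String) (n m : Int) :
    ∀ ps : List (Int × Int), (∀ p ∈ ps, inR n m p.1 p.2) →
      outerA MAP n m ps = if ps.any (fun p => danger MAP n m p.1 p.2) then 0 else 1 := by
  intro ps
  induction ps with
  | nil => intro _; rfl
  | cons p rest ih =>
    intro hps
    have hloop : loopA MAP n m (n.toNat * m.toNat + 6) [(p.1, p.2, 0)] (initV n m p) =
        danger MAP n m p.1 p.2 := by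
      have h1 := loopA_start MAP n m p (n.toNat * m.toNat + 6) (by omega)
        (hps p List.mem_cons_self)
      have h2' : danger MAP n m p.1 p.2 = true ↔
          (∃ d ∈ deltaA, inR n m (p.1 + d.1) (p.2 + d.2) ∧
            (chA MAP (p.1 + d.1) (p.2 + d.2) = 'P' ∨
             (chA MAP (p.1 + d.1) (p.2 + d.2) = 'O' ∧
              Qual MAP n m p (p.1 + d.1) (p.2 + d.2)))) := by
        rw [danger_iff MAP n m p.1 p.2]
      cases hd : danger MAP n m p.1 p.2 with
      | true => exact h1.mpr (h2'.mp hd)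
      | false =>
        cases hl : loopA MAP n m (n.toNat * m.toNat + 6) [(p.1, p.2, 0)] (initV n m p) with
        | false => rfl
        | true => exact absurd (h2'.mpr (h1.mp hl)) (by simp [hd])
    simp only [outerA, List.any_cons, hloop]
    by_cases hd : danger MAP n m p.1 p.2 = true
    · simp [hd]
    · have hd' : danger MAP n m p.1 p.2 = false := by simpa using hd
      simp only [hd', Bool.false_or, Bool.false_eq_true, if_false]
      exact ih (fun q hq => hps q (List.mem_cons_of_mem _ hq))

lemma pListA_eq (MAP : List String) (n m : Int) :
    pListA MAP n m = (PySem.List.pyRange 0 n 1).flatMap (fun i =>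
      ((PySem.List.pyRange 0 m 1).filter (fun j => chA MAP i j == 'P')).map
        (fun j => ((i, j) : Int × Int))) := by
  unfold pListA
  have hin : ∀ (acc : List (Int × Int)) (i : Int),
      (PySem.List.pyRange 0 m 1).foldl (fun acc2 j =>
        if chA MAP i j == 'P' then acc2 ++ [(i, j)] else acc2) acc =
      acc ++ ((PySem.List.pyRange 0 m 1).filter (fun j => chA MAP i j == 'P')).map
        (fun j => ((i, j) : Int × Int)) := by
    intro acc i
    exact PySem.List.foldl_append_if _ _ _ _
  have hmain : ∀ (acc : List (Int × Int)),
      (PySem.List.pyRange 0 n 1).foldl (fun acc i =>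
        (PySem.List.pyRange 0 m 1).foldl (fun acc2 j =>
          if chA MAP i j == 'P' then acc2 ++ [(i, j)] else acc2) acc) acc =
      acc ++ (PySem.List.pyRange 0 n 1).flatMap (fun i =>
        ((PySem.List.pyRange 0 m 1).filter (fun j => chA MAP i j == 'P')).map
          (fun j => ((i, j) : Int × Int))) := by
    intro acc
    rw [show (fun (acc : List (Int × Int)) (i : Int) =>
        (PySem.List.pyRange 0 m 1).foldl (fun acc2 j =>
          if chA MAP i j == 'P' then acc2 ++ [(i, j)] else acc2) acc) =
      (fun acc i => acc ++ ((PySem.List.pyRange 0 m 1).filter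
          (fun j => chA MAP i j == 'P')).map (fun j => ((i, j) : Int × Int))) from
      funext fun acc => funext fun i => hin acc i]
    exact PySem.List.foldl_append_eq_flatMap _ _ _
  simpa using hmain []

lemma bfs_eq_alt (MAP : List String) : bfs MAP = bfs_alt MAP := by
  simp only [bfs, bfs_alt]
  rw [outerA_eq]
  · have hcond : (pListA MAP (MAP.length : Int)
        (((PySem.List.pyGet? MAP 0).getD "").toList.length : Int)).any
          (fun p => danger MAP (MAP.length : Int)
            (((PySem.List.pyGet? MAP 0).getD "").toList.length : Int) p.1 p.2) =
        (PySem.List.pyRange 0 (MAP.length : Int) 1).any (fun i =>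
          (PySem.List.pyRange 0 (((PySem.List.pyGet? MAP 0).getD "").toList.length : Int) 1).any
            fun j => (chA MAP i j == 'P') && danger MAP (MAP.length : Int)
              (((PySem.List.pyGet? MAP 0).getD "").toList.length : Int) i j) := by
      rw [pListA_eq, List.any_flatMap]
      refine List.any_congr rfl ?_
      intro i
      rw [List.any_map, List.any_filter]
      refine List.any_congr rfl ?_
      intro j
      simp [Function.comp]
    rw [hcond]
  · intro p hp
    rw [pListA_eq] at hp
    obtain ⟨i, hi, hp⟩ := List.mem_flatMap.mp hp
    obtain ⟨j, hj, rfl⟩ := List.mem_map.mp hp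
    have hj' := List.mem_filter.mp hj
    rw [PySem.List.mem_pyRange_one] at hi
    have hj'' := hj'.1
    rw [PySem.List.mem_pyRange_one] at hj''
    exact ⟨hi.1, hi.2, hj''.1, hj''.2⟩

-- ===== VERDICT (by name: the statement is the Claim_ definition above) =====
theorem bfs_spec : Claim_equal_bfs := by
  intro MAP _ _
  unfold Spec_bfs
  exact bfs_eq_alt MAP
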